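-- pv_equiv track=rewrite | github.com/ucv-cs/Fundamentele-algebrice-ale-informaticii | T8_polynomials.py | multiply_polys
-- ===== SOURCE A (Python) =====
-- def add_polys(x, y):
-- 	"""calculează suma a două polinoame"""
-- 	#algoritm: utilizând dicționare de tip {exponent : coeficient}:
-- 	# - iterează primul dicționar și pentru fiecare exponent verifică
-- 	# 		dacă există în cel de-al doilea dicționar
-- 	# - dacă există exponenți comuni, adună coeficienții corespunzători
-- 	sum = x.copy() #inițializează rezultatul
--
-- 	for exponent, coefficient in y.items():
-- 		if exponent in x.keys():
-- 			#dacă exponentul este comun, adună coeficienții în rezultat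
-- 			sum[exponent] += y[exponent]
-- 		else:
-- 			#dacă exponentul există doar în al doilea polinom, adaugă-l
-- 			# la rezultat și asociază-l cu coeficientul corespunzător
-- 			sum[exponent] = y[exponent]
--
-- 	return sum
--
-- def multiply_polys(x, y):
-- 	"""calculează produsul a două polinoame"""
-- 	#algoritm: iterează primul polinom și pentru fiecare element din el,
-- 	# iterează în cel de-al doilea polinom realizând înmulțirea termen cu termen
-- 	product = dict() #inițializează rezultatul
--
-- 	for exponent_x, coefficient_x in x.items():
-- 		for exponent_y, coefficient_y in y.items():
-- 			temp = dict() #reprezentarea unui monom temporar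
-- 			exponent_prod = exponent_x + exponent_y #adună exponenții
-- 			coefficient_prod = coefficient_x * coefficient_y #înmulțește coeficienții
-- 			temp[exponent_prod] = coefficient_prod
-- 			product = add_polys(product, temp)
--
-- 	return product
-- ===== SOURCE B (Python) =====
-- def multiply_polys(x, y):
-- 	"""calculează produsul a două polinoame"""
-- 	# staged: first build the flat list of all monomial products of the
-- 	# cross product, then aggregate it into the result dict in one pass
-- 	terms = [(ex + ey, cx * cy) for ex, cx in x.items() for ey, cy in y.items()]
-- 	product = dict()
-- 	for e, c in terms:
-- 		if e in product:
-- 			product[e] += c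
-- 		else:
-- 			product[e] = c
-- 	return product
-- ===== Notes on version B (the rewrite author's own statement) =====
-- stated objective: faster
-- what changed: B is staged: it first materialises the flat list of all monomial products (exponent sum, coefficient product) and then aggregates that list into the result dict in one linear pass, removing A's per-term one-entry dict and full copy-and-merge via add_polys.
import Mathlib
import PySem

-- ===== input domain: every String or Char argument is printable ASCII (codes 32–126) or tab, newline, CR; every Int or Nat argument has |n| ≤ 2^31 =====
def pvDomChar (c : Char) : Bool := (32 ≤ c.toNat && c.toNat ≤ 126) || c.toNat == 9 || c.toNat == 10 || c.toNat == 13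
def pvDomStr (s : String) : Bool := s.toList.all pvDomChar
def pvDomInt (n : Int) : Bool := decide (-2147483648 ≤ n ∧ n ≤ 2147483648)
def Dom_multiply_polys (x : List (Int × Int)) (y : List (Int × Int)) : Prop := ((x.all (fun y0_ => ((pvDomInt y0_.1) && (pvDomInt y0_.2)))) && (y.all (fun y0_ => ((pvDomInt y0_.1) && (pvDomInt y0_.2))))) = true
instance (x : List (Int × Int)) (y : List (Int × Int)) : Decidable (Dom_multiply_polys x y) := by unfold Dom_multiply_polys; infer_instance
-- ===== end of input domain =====

-- B stages the work: flat list of all monomial products first, then one aggregation pass (asymptotically faster than A's per-term copy-and-merge).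

-- ===== PORT A =====
-- helper: add_polys(x, y) — copy x, then fold over y's items adding/inserting coefficients
def add_polys (x y : PySem.Dict Int Int) : PySem.Dict Int Int :=
  y.items.foldl (fun s p =>
    if x.contains p.1 then s.insert p.1 (s.getD p.1 0 + y.getD p.1 0)
    else s.insert p.1 (y.getD p.1 0)) x

def multiply_polys (x : List (Int × Int)) (y : List (Int × Int)) : List (Int × Int) :=
  ((PySem.Dict.ofList x).items.foldl (fun product px =>
    (PySem.Dict.ofList y).items.foldl (fun product py =>
      let temp : PySem.Dict Int Int := (PySem.Dict.empty).insert (px.1 + py.1) (px.2 * py.2)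
      add_polys product temp) product) PySem.Dict.empty).items

-- ===== PORT B =====
def multiply_polys_alt (x : List (Int × Int)) (y : List (Int × Int)) : List (Int × Int) :=
  let terms := (PySem.Dict.ofList x).items.flatMap (fun px =>
    (PySem.Dict.ofList y).items.map (fun py => (px.1 + py.1, px.2 * py.2)))
  (terms.foldl (fun product t =>
    if product.contains t.1 then product.insert t.1 (product.getD t.1 0 + t.2)
    else product.insert t.1 t.2) (PySem.Dict.empty : PySem.Dict Int Int)).items

-- ===== PRECONDITION & SPEC =====
def Spec_multiply_polys (x : List (Int × Int)) (y : List (Int × Int)) (out : List (Int × Int)) : Prop := out = multiply_polys_alt x y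
instance (x : List (Int × Int)) (y : List (Int × Int)) (out : List (Int × Int)) : Decidable (Spec_multiply_polys x y out) := by unfold Spec_multiply_polys; infer_instance

-- ===== CLAIM (what is proved, stated in full; the proofs are below) =====
def Claim_equal_multiply_polys : Prop := ∀ (x : List (Int × Int)) (y : List (Int × Int)), Dom_multiply_polys x y → Spec_multiply_polys x y (multiply_polys x y)

-- ===== LEMMAS AND PROOFS =====

-- the common accumulation step both sides reduce to
def accStep (d : PySem.Dict Int Int) (t : Int × Int) : PySem.Dict Int Int :=
  d.insert t.1 (d.getD t.1 0 + t.2)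

-- A's add_polys of a one-entry dict is exactly one accumulation step
theorem add_polys_singleton (d : PySem.Dict Int Int) (e c : Int) :
    add_polys d ((PySem.Dict.empty).insert e c) = accStep d (e, c) := by
  have hitems : ((PySem.Dict.empty : PySem.Dict Int Int).insert e c).items = [(e, c)] := rfl
  unfold add_polys accStep
  rw [hitems]
  simp only [List.foldl_cons, List.foldl_nil]
  by_cases h : d.contains e = true
  · simp [h, PySem.Dict.getD_insert_self]
  · have h' : d.contains e = false := by simpa using h
    rw [PySem.Dict.getD_of_not_contains d 0 h']
    simp [h', PySem.Dict.getD_insert_self]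

-- B's if/else aggregation step is the same accumulation step
theorem bStep_eq_accStep (d : PySem.Dict Int Int) (t : Int × Int) :
    (if d.contains t.1 then d.insert t.1 (d.getD t.1 0 + t.2) else d.insert t.1 t.2)
      = accStep d t := by
  unfold accStep
  by_cases h : d.contains t.1 = true
  · simp [h]
  · have h' : d.contains t.1 = false := by simpa using h
    rw [PySem.Dict.getD_of_not_contains d 0 h']
    simp [h']

-- folding over a flatMap is the nested fold
theorem foldl_flatMap {α β γ : Type} (l : List α) (g : α → List β)
    (f : γ → β → γ) (init : γ) :
    (l.flatMap g).foldl f init = l.foldl (fun acc a => (g a).foldl f acc) init := by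
  induction l generalizing init with
  | nil => rfl
  | cons a l ih => simp [List.flatMap_cons, List.foldl_append, ih]

-- ===== VERDICT (by name: the statement is the Claim_ definition above) =====
theorem multiply_polys_spec : Claim_equal_multiply_polys := by
  intro x y _
  unfold Spec_multiply_polys multiply_polys multiply_polys_alt
  congr 1
  rw [foldl_flatMap]
  apply PySem.List.foldl_congr_mem
  intro p px _
  rw [List.foldl_map]
  apply PySem.List.foldl_congr_mem
  intro q py _
  exact (add_polys_singleton q (px.1 + py.1) (px.2 * py.2)).trans
    (bStep_eq_accStep q (px.1 + py.1, px.2 * py.2)).symm
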